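-- pv_equiv track=rewrite | github.com/radtrentasei/I_am_router | utils.py | generate_ids
-- ===== SOURCE A (Python) =====
-- def generate_ids(size):
--     ids = [None for _ in range(size*size)]
--     group = 1
--     for row in range(0, size, 2):
--         for col in range(0, size, 2):
--             for lrow in range(2):
--                 for lcol in range(2):
--                     r = row + lrow
--                     c = col + lcol
--                     if r < size and c < size:
--                         idx = r * size + c
--                         global_id = idx + 1
--                         local_id = lrow * 2 + lcol + 1
--                         ids[idx] = {
--                             "global_id": global_id,
--                             "group_id": group,
--                             "local_id": local_id
--                         }
--             group += 1
--     return ids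
-- ===== SOURCE B (Python) =====
-- def generate_ids(size):
--     # Single flat row-major pass; each cell's group is computed in closed form
--     # instead of threading a block counter through 2x2 block loops.
--     ids = [None] * (size * size)
--     num_block_cols = (size + 1) // 2
--     for r in range(size):
--         for c in range(size):
--             ids[r * size + c] = {
--                 "global_id": r * size + c + 1,
--                 "group_id": (r // 2) * num_block_cols + c // 2 + 1,
--                 "local_id": (r % 2) * 2 + (c % 2) + 1,
--             }
--     return ids
-- ===== Notes on version B (the rewrite author's own statement) =====
-- stated objective: simpler
-- what changed: Replaced the block-by-block traversal with its incrementing group counter by a single flat row-major pass over all cells that derives each cell's group id arithmetically from its row and column block indices.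
import Mathlib
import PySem

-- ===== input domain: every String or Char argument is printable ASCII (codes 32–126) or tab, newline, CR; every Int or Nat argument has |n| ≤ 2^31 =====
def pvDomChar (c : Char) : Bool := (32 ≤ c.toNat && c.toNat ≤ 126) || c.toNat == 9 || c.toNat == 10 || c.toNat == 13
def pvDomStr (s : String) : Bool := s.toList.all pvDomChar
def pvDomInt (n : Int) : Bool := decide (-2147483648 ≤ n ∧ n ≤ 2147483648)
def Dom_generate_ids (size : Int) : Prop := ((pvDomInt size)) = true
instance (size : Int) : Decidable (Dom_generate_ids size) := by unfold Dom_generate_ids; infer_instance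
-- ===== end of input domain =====

-- B replaces A's 2x2-block traversal with its group counter by a flat row-major pass
-- computing each cell's group id in closed form (simpler decomposition; same cost).

-- ===== PORT A =====
def generate_ids (size : Int) : List (Option (List (String × Int))) :=
  let ids : List (Option (List (String × Int))) := (PySem.List.pyRange 0 (size * size) 1).map (fun _ => none)
  let st := (PySem.List.pyRange 0 size 2).foldl (fun st row =>
      (PySem.List.pyRange 0 size 2).foldl (fun (st : List (Option (List (String × Int))) × Int) col =>
        let ids := (PySem.List.pyRange 0 2 1).foldl (fun ids lrow =>
            (PySem.List.pyRange 0 2 1).foldl (fun ids lcol =>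
              let r := row + lrow
              let c := col + lcol
              if r < size ∧ c < size then
                let idx := r * size + c
                PySem.List.pySetD ids idx (some [("global_id", idx + 1), ("group_id", st.2), ("local_id", lrow * 2 + lcol + 1)])
              else ids) ids) st.1
        (ids, st.2 + 1)) st) (ids, 1)
  st.1

-- ===== PORT B =====
def generate_ids_alt (size : Int) : List (Option (List (String × Int))) :=
  let ids : List (Option (List (String × Int))) := PySem.List.pyRepeat [none] (size * size)
  let num_block_cols := PySem.Int.floordiv (size + 1) 2
  let ids := (PySem.List.pyRange 0 size 1).foldl (fun ids r =>
      (PySem.List.pyRange 0 size 1).foldl (fun ids c =>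
        PySem.List.pySetD ids (r * size + c)
          (some [("global_id", r * size + c + 1),
                 ("group_id", PySem.Int.floordiv r 2 * num_block_cols + PySem.Int.floordiv c 2 + 1),
                 ("local_id", PySem.Int.mod r 2 * 2 + PySem.Int.mod c 2 + 1)])) ids) ids
  ids

-- ===== PRECONDITION & SPEC =====
def Spec_generate_ids (size : Int) (out : List (Option (List (String × Int)))) : Prop := out = generate_ids_alt size
instance (size : Int) (out : List (Option (List (String × Int)))) : Decidable (Spec_generate_ids size out) := by unfold Spec_generate_ids; infer_instance

-- ===== CLAIM (what is proved, stated in full; the proofs are below) =====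
def Claim_equal_generate_ids : Prop := ∀ (size : Int), Dom_generate_ids size → Spec_generate_ids size (generate_ids size)

-- ===== LEMMAS AND PROOFS =====

-- generic write machinery
def pvWr {α : Type} (l : List (Int × α)) (ids : List α) : List α :=
  l.foldl (fun ids p => PySem.List.pySetD ids p.1 p.2) ids

theorem pvWr_cons {α : Type} (q : Int × α) (t : List (Int × α)) (ids : List α) :
    pvWr (q :: t) ids = pvWr t (PySem.List.pySetD ids q.1 q.2) := rfl

theorem pvWr_length {α : Type} (l : List (Int × α)) (ids : List α) :
    (pvWr l ids).length = ids.length := by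
  induction l generalizing ids with
  | nil => rfl
  | cons q t ih => rw [pvWr_cons, ih, PySem.List.length_pySetD]

theorem pvWr_not_mem {α : Type} (l : List (Int × α)) (ids : List α) (k : Nat)
    (h0 : ∀ p ∈ l, 0 ≤ p.1) (hk : ∀ p ∈ l, p.1.toNat ≠ k) :
    (pvWr l ids)[k]? = ids[k]? := by
  induction l generalizing ids with
  | nil => rfl
  | cons q t ih =>
    rw [pvWr_cons, ih _ (fun p hp => h0 p (List.mem_cons_of_mem _ hp))
        (fun p hp => hk p (List.mem_cons_of_mem _ hp)),
      PySem.List.pySetD_of_nonneg _ _ (h0 q List.mem_cons_self),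
      List.getElem?_set_ne (hk q List.mem_cons_self)]

theorem pvWr_mem {α : Type} (l : List (Int × α)) (ids : List α)
    (hb : ∀ p ∈ l, 0 ≤ p.1 ∧ p.1.toNat < ids.length)
    (hnd : l.Pairwise (fun p q => p.1 ≠ q.1)) :
    ∀ p ∈ l, (pvWr l ids)[p.1.toNat]? = some p.2 := by
  induction l generalizing ids with
  | nil => intro p hp; simp at hp
  | cons q t ih =>
    intro p hp
    rcases List.mem_cons.1 hp with rfl | hp'
    · rw [pvWr_cons]
      have h0 : ∀ x ∈ t, 0 ≤ x.1 := fun x hx => (hb x (List.mem_cons_of_mem _ hx)).1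
      have hq0 : 0 ≤ p.1 := (hb p List.mem_cons_self).1
      have hne : ∀ x ∈ t, x.1.toNat ≠ p.1.toNat := by
        intro x hx
        have := (List.pairwise_cons.1 hnd).1 x hx
        have := h0 x hx
        omega
      rw [pvWr_not_mem _ _ _ h0 hne, PySem.List.pySetD_of_nonneg _ _ hq0,
        List.getElem?_set_self (hb p List.mem_cons_self).2]
    · rw [pvWr_cons]
      refine ih _ ?_ (List.pairwise_cons.1 hnd).2 p hp'
      intro x hx
      have := hb x (List.mem_cons_of_mem _ hx)
      rwa [PySem.List.length_pySetD]

theorem pvFoldl_foldl {β γ σ : Type} (l : List β) (g : β → List γ) (f : σ → γ → σ) (init : σ) :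
    l.foldl (fun s b => (g b).foldl f s) init = (l.flatMap g).foldl f init := by
  induction l generalizing init with
  | nil => rfl
  | cons b t ih => simp [List.foldl_append, ih]

theorem pvCounter {σ β : Type} (blocks : List β) (f : σ → Int → β → σ) (ids : σ) (g : Int) :
    (blocks.foldl (fun st b => (f st.1 st.2 b, st.2 + 1)) (ids, g)).1
      = (PySem.List.enumerate blocks g).foldl (fun ids p => f ids p.1 p.2) ids := by
  induction blocks generalizing ids g with
  | nil => rfl
  | cons b t ih => rw [PySem.List.enumerate_cons]; simp only [List.foldl_cons]; exact ih _ _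

theorem pvPairwise_flatMap {β γ : Type} {R : γ → γ → Prop} (l : List β) (f : β → List γ)
    (hin : ∀ b ∈ l, (f b).Pairwise R)
    (hout : l.Pairwise (fun b b' => ∀ x ∈ f b, ∀ y ∈ f b', R x y)) :
    (l.flatMap f).Pairwise R := by
  induction l with
  | nil => simp
  | cons b t ih =>
    rw [List.flatMap_cons, List.pairwise_append]
    refine ⟨hin b List.mem_cons_self, ih (fun x hx => hin x (List.mem_cons_of_mem _ hx))
      (List.pairwise_cons.1 hout).2, ?_⟩
    intro x hx y hy
    rcases List.mem_flatMap.1 hy with ⟨b', hb', hy'⟩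
    exact (List.pairwise_cons.1 hout).1 b' hb' x hx y hy'

theorem pvEnc_bounds {size r c : Int} (hr : 0 ≤ r) (hr2 : r < size) (hc : 0 ≤ c) (hc2 : c < size) :
    0 ≤ r * size + c ∧ r * size + c < size * size := by
  have hs : 0 < size := lt_of_le_of_lt hc hc2
  constructor
  · have := mul_nonneg hr hs.le; omega
  · have h2 : (r + 1) * size ≤ size * size := by
      rw [mul_comm size size]; exact mul_le_mul_of_nonneg_right (by omega) hs.le
    nlinarith

theorem pvEnc_inj {size r c r' c' : Int} (hc : 0 ≤ c) (hc2 : c < size) (hc' : 0 ≤ c') (hc2' : c' < size)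
    (h : r * size + c = r' * size + c') : r = r' ∧ c = c' := by
  have hs : 0 < size := lt_of_le_of_lt hc hc2
  have hrr : r = r' := by
    rcases lt_trichotomy r r' with h1 | h1 | h1
    · have h2 : (r + 1) * size ≤ r' * size := mul_le_mul_of_nonneg_right (by omega) hs.le
      nlinarith
    · exact h1
    · have h2 : (r' + 1) * size ≤ r * size := mul_le_mul_of_nonneg_right (by omega) hs.le
      nlinarith
  subst hrr
  exact ⟨rfl, by omega⟩

theorem pvLen_grid {γ : Type} (n m : Nat) (f : Nat → Nat → γ) :
    ((List.range n).flatMap (fun i => (List.range m).map (f i))).length = n * m := by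
  induction n with
  | zero => simp
  | succ n ih => rw [List.range_succ, List.flatMap_append]; simp [ih, Nat.succ_mul]

theorem pvGrid_getElem {γ : Type} (n m : Nat) (f : Nat → Nat → γ) (a b : Nat) (ha : a < n) (hb : b < m) :
    ((List.range n).flatMap (fun i => (List.range m).map (f i)))[a * m + b]? = some (f a b) := by
  induction n with
  | zero => omega
  | succ n ih =>
    rw [List.range_succ, List.flatMap_append]
    by_cases hcase : a < n
    · rw [List.getElem?_append_left]
      · exact ih hcase
      · rw [pvLen_grid]
        calc a * m + b < (a + 1) * m := by rw [Nat.succ_mul]; omega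
        _ ≤ n * m := Nat.mul_le_mul_right m hcase
    · have haa : a = n := by omega
      subst haa
      rw [List.getElem?_append_right (by rw [pvLen_grid]; omega)]
      rw [pvLen_grid]
      simp [hb]

-- event lists describing the two programs' writes
def pvCellsA (size g row col : Int) : List (Int × Option (List (String × Int))) :=
  (([((0:Int),(0:Int)), (0,1), (1,0), (1,1)]).filter
      (fun lc => decide (row + lc.1 < size ∧ col + lc.2 < size))).map
    (fun lc => ((row + lc.1) * size + (col + lc.2),
      some [("global_id", (row + lc.1) * size + (col + lc.2) + 1), ("group_id", g),
            ("local_id", lc.1 * 2 + lc.2 + 1)]))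

def pvBlocksA (size : Int) : List (Int × Int) :=
  (PySem.List.pyRange 0 size 2).flatMap (fun row => (PySem.List.pyRange 0 size 2).map (fun col => (row, col)))

def pvEventsA (size : Int) : List (Int × Option (List (String × Int))) :=
  (PySem.List.enumerate (pvBlocksA size) 1).flatMap (fun p => pvCellsA size p.1 p.2.1 p.2.2)

def pvValB (size r c : Int) : Option (List (String × Int)) :=
  some [("global_id", r * size + c + 1),
        ("group_id", PySem.Int.floordiv r 2 * PySem.Int.floordiv (size + 1) 2 + PySem.Int.floordiv c 2 + 1),
        ("local_id", PySem.Int.mod r 2 * 2 + PySem.Int.mod c 2 + 1)]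

def pvEventsB (size : Int) : List (Int × Option (List (String × Int))) :=
  (PySem.List.pyRange 0 size 1).flatMap
    (fun r => (PySem.List.pyRange 0 size 1).map (fun c => (r * size + c, pvValB size r c)))

def pvInit (size : Int) : List (Option (List (String × Int))) :=
  List.replicate (size * size).toNat none

theorem pvA_eq (size : Int) : generate_ids size = pvWr (pvEventsA size) (pvInit size) := by
  have h01 : PySem.List.pyRange 0 2 1 = [0, 1] := by decide
  have hblock : ∀ (g row col : Int) (ids : List (Option (List (String × Int)))),
      ((PySem.List.pyRange 0 2 1).foldl (fun ids lrow =>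
        (PySem.List.pyRange 0 2 1).foldl (fun ids lcol =>
          if row + lrow < size ∧ col + lcol < size then
            PySem.List.pySetD ids ((row + lrow) * size + (col + lcol))
              (some [("global_id", (row + lrow) * size + (col + lcol) + 1), ("group_id", g),
                     ("local_id", lrow * 2 + lcol + 1)])
          else ids) ids) ids) = pvWr (pvCellsA size g row col) ids := by
    intro g row col ids
    rw [h01]
    simp only [List.foldl_cons, List.foldl_nil, pvCellsA, List.filter_cons, List.filter_nil,
      decide_eq_true_eq]
    split_ifs <;> simp [pvWr]
  have hinit : (PySem.List.pyRange 0 (size * size) 1).map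
      (fun _ => (none : Option (List (String × Int)))) = pvInit size := by
    rw [PySem.List.pyRange_one, List.map_map]
    simp only [Function.comp_def, List.map_const', List.length_range]
    simp [pvInit]
  have hcols : ∀ (row : Int) (st : List (Option (List (String × Int))) × Int),
      (PySem.List.pyRange 0 size 2).foldl
        (fun st col => (pvWr (pvCellsA size st.2 row col) st.1, st.2 + 1)) st
      = ((PySem.List.pyRange 0 size 2).map (fun col => (row, col))).foldl
          (fun st rc => (pvWr (pvCellsA size st.2 rc.1 rc.2) st.1, st.2 + 1)) st := by
    intro row st; rw [List.foldl_map]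
  simp only [generate_ids, hblock, hinit, hcols]
  rw [pvFoldl_foldl (PySem.List.pyRange 0 size 2)
      (fun row => (PySem.List.pyRange 0 size 2).map (fun col => (row, col)))
      (fun st rc => (pvWr (pvCellsA size st.2 rc.1 rc.2) st.1, st.2 + 1)) (pvInit size, 1)]
  rw [show List.flatMap (fun row => List.map (fun col => (row, col)) (PySem.List.pyRange 0 size 2))
      (PySem.List.pyRange 0 size 2) = pvBlocksA size from rfl]
  rw [pvCounter (pvBlocksA size) (fun ids g rc => pvWr (pvCellsA size g rc.1 rc.2) ids) (pvInit size) 1]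
  rw [show (fun (ids : List (Option (List (String × Int)))) (p : Int × (Int × Int)) =>
        pvWr (pvCellsA size p.1 p.2.1 p.2.2) ids)
      = fun ids p => (pvCellsA size p.1 p.2.1 p.2.2).foldl
          (fun ids q => PySem.List.pySetD ids q.1 q.2) ids from rfl]
  rw [pvFoldl_foldl (PySem.List.enumerate (pvBlocksA size) 1)
      (fun p => pvCellsA size p.1 p.2.1 p.2.2)
      (fun ids q => PySem.List.pySetD ids q.1 q.2) (pvInit size)]
  rfl

theorem pvB_eq (size : Int) : generate_ids_alt size = pvWr (pvEventsB size) (pvInit size) := by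
  have hcols : ∀ (r : Int) (ids : List (Option (List (String × Int)))),
      (PySem.List.pyRange 0 size 1).foldl
        (fun ids c => PySem.List.pySetD ids (r * size + c)
          (some [("global_id", r * size + c + 1),
                 ("group_id", PySem.Int.floordiv r 2 * PySem.Int.floordiv (size + 1) 2 +
                    PySem.Int.floordiv c 2 + 1),
                 ("local_id", PySem.Int.mod r 2 * 2 + PySem.Int.mod c 2 + 1)])) ids
      = ((PySem.List.pyRange 0 size 1).map (fun c => (r * size + c, pvValB size r c))).foldl
          (fun ids q => PySem.List.pySetD ids q.1 q.2) ids := by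
    intro r ids; rw [List.foldl_map]; rfl
  simp only [generate_ids_alt, PySem.List.pyRepeat_singleton, hcols]
  rw [pvFoldl_foldl (PySem.List.pyRange 0 size 1)
      (fun r => (PySem.List.pyRange 0 size 1).map (fun c => (r * size + c, pvValB size r c)))
      (fun ids q => PySem.List.pySetD ids q.1 q.2) (List.replicate (size * size).toNat none)]
  rfl

theorem pvCellsA_mem {size g row col : Int} {x : Int × Option (List (String × Int))}
    (hx : x ∈ pvCellsA size g row col) :
    ∃ lr lc : Int, (lr = 0 ∨ lr = 1) ∧ (lc = 0 ∨ lc = 1) ∧ row + lr < size ∧ col + lc < size ∧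
      x = ((row + lr) * size + (col + lc),
        some [("global_id", (row + lr) * size + (col + lc) + 1), ("group_id", g),
              ("local_id", lr * 2 + lc + 1)]) := by
  unfold pvCellsA at hx
  rcases List.mem_map.1 hx with ⟨lcp, hlcp, rfl⟩
  rcases List.mem_filter.1 hlcp with ⟨hmem, hcond⟩
  rw [decide_eq_true_eq] at hcond
  refine ⟨lcp.1, lcp.2, ?_, ?_, hcond.1, hcond.2, rfl⟩ <;>
    · simp only [List.mem_cons, List.not_mem_nil, or_false] at hmem
      rcases hmem with rfl | rfl | rfl | rfl <;> simp

theorem pvBlocksA_mem {size : Int} {q : Int × Int} (hq : q ∈ pvBlocksA size) :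
    0 ≤ q.1 ∧ q.1 < size ∧ 0 ≤ q.2 ∧ q.2 < size := by
  unfold pvBlocksA at hq
  rcases List.mem_flatMap.1 hq with ⟨row, hrow, hq'⟩
  rcases List.mem_map.1 hq' with ⟨col, hcol, rfl⟩
  have h1 := (PySem.List.mem_pyRange_iff_of_pos (by norm_num : (0:Int) < 2) row).1 hrow
  have h2 := (PySem.List.mem_pyRange_iff_of_pos (by norm_num : (0:Int) < 2) col).1 hcol
  exact ⟨h1.1, h1.2.1, h2.1, h2.2.1⟩

theorem pvEventsA_bounds {size : Int} : ∀ p ∈ pvEventsA size,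
    0 ≤ p.1 ∧ p.1.toNat < (pvInit size).length := by
  intro p hp
  rcases List.mem_flatMap.1 hp with ⟨q, hq, hp'⟩
  rcases (PySem.List.mem_enumerate_iff _ _ _).1 hq with ⟨k, hk, rfl⟩
  have hblk := pvBlocksA_mem (List.getElem_mem hk)
  rcases pvCellsA_mem hp' with ⟨lr, lc, hlr, hlc, hr2, hc2, rfl⟩
  have hb := pvEnc_bounds (size := size) (r := (pvBlocksA size)[k].1 + lr)
      (c := (pvBlocksA size)[k].2 + lc) (by omega) hr2 (by omega) hc2
  simp only [pvInit, List.length_replicate]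
  omega

theorem pvCellsA_pairwise {size g row col : Int} (hcol : 0 ≤ col) :
    (pvCellsA size g row col).Pairwise (fun p q => p.1 ≠ q.1) := by
  unfold pvCellsA
  rw [List.pairwise_map, List.pairwise_filter]
  simp only [decide_eq_true_eq]
  refine List.Pairwise.cons ?_ (List.Pairwise.cons ?_ (List.Pairwise.cons ?_ (List.pairwise_singleton _ _))) <;>
  · intro y hy h1 h2 heq
    simp only [List.mem_cons, List.not_mem_nil, or_false] at hy
    rcases hy with rfl | rfl | rfl | rfl <;>
    · simp only at heq h1 h2
      have := pvEnc_inj (by omega) h1.2 (by omega) h2.2 heq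
      omega

theorem pvEventsB_mem {size : Int} {p : Int × Option (List (String × Int))}
    (hp : p ∈ pvEventsB size) :
    ∃ r c : Int, 0 ≤ r ∧ r < size ∧ 0 ≤ c ∧ c < size ∧ p = (r * size + c, pvValB size r c) := by
  unfold pvEventsB at hp
  rcases List.mem_flatMap.1 hp with ⟨r, hr, hp'⟩
  rcases List.mem_map.1 hp' with ⟨c, hc, rfl⟩
  have h1 := PySem.List.mem_pyRange_one.1 hr
  have h2 := PySem.List.mem_pyRange_one.1 hc
  exact ⟨r, c, h1.1, h1.2, h2.1, h2.2, rfl⟩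

theorem pvEventsB_bounds {size : Int} : ∀ p ∈ pvEventsB size,
    0 ≤ p.1 ∧ p.1.toNat < (pvInit size).length := by
  intro p hp
  rcases pvEventsB_mem hp with ⟨r, c, hr, hr2, hc, hc2, rfl⟩
  have := pvEnc_bounds hr hr2 hc hc2
  simp only [pvInit, List.length_replicate]
  omega

theorem pvEventsB_pairwise {size : Int} :
    (pvEventsB size).Pairwise (fun p q => p.1 ≠ q.1) := by
  unfold pvEventsB
  apply pvPairwise_flatMap
  · intro r _
    rw [List.pairwise_map]
    exact (PySem.List.pairwise_lt_pyRange_one 0 size).imp (by intro c c' hcc heq; omega)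
  · refine (PySem.List.pairwise_lt_pyRange_one 0 size).imp ?_
    intro r r' hrr x hx y hy
    rcases List.mem_map.1 hx with ⟨c, hc, rfl⟩
    rcases List.mem_map.1 hy with ⟨c', hc', rfl⟩
    have h1 := PySem.List.mem_pyRange_one.1 hc
    have h2 := PySem.List.mem_pyRange_one.1 hc'
    intro heq
    simp only at heq
    have := pvEnc_inj h1.1 h1.2 h2.1 h2.2 heq
    omega

theorem pvBlocksA_eq {size : Int} (hs : 0 < size) :
    pvBlocksA size = (List.range ((size + 1) / 2).toNat).flatMap
      (fun (a : Nat) => (List.range ((size + 1) / 2).toNat).map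
        (fun (b : Nat) => ((2 * (a : Int), 2 * (b : Int)) : Int × Int))) := by
  unfold pvBlocksA
  rw [PySem.List.pyRange_of_pos 0 size (by norm_num : (0:Int) < 2)]
  rw [if_pos hs]
  have hcount : ((size - 0 + 2 - 1) / 2).toNat = ((size + 1) / 2).toNat := by ring_nf
  rw [hcount, List.flatMap_map]
  simp only [List.map_map, Function.comp_def, zero_add]

theorem pvBlocksA_length {size : Int} (hs : 0 < size) :
    (pvBlocksA size).length = ((size + 1) / 2).toNat * ((size + 1) / 2).toNat := by
  rw [pvBlocksA_eq hs]
  exact pvLen_grid _ _ _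

theorem pvBlocksA_getElem {size : Int} (hs : 0 < size) (a b : Nat)
    (ha : a < ((size + 1) / 2).toNat) (hb : b < ((size + 1) / 2).toNat) :
    (pvBlocksA size)[a * ((size + 1) / 2).toNat + b]? = some ((2 * (a : Int), 2 * (b : Int))) := by
  rw [pvBlocksA_eq hs]
  exact pvGrid_getElem _ _ _ a b ha hb

theorem pvEventsA_pairwise {size : Int} (hs : 0 < size) :
    (pvEventsA size).Pairwise (fun p q => p.1 ≠ q.1) := by
  unfold pvEventsA
  apply pvPairwise_flatMap
  · intro q hq
    rcases (PySem.List.mem_enumerate_iff _ _ _).1 hq with ⟨k, hk, rfl⟩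
    have hblk := pvBlocksA_mem (List.getElem_mem hk)
    refine pvCellsA_pairwise ?_
    simpa using hblk.2.2.1
  · rw [List.pairwise_iff_getElem]
    intro i j hi hj hij
    have hnbc0 : 0 < ((size + 1) / 2).toNat := by omega
    have hlen : (pvBlocksA size).length = ((size + 1) / 2).toNat * ((size + 1) / 2).toNat :=
      pvBlocksA_length hs
    rw [PySem.List.length_enumerate] at hi hj
    have hblkget : ∀ (m : Nat) (hm : m < (pvBlocksA size).length),
        (pvBlocksA size)[m]'hm =
          (2 * ((m / ((size + 1) / 2).toNat : Nat) : Int), 2 * ((m % ((size + 1) / 2).toNat : Nat) : Int)) := by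
      intro m hm
      have ham : m / ((size + 1) / 2).toNat < ((size + 1) / 2).toNat := by
        rw [hlen] at hm
        exact (Nat.div_lt_iff_lt_mul hnbc0).2 hm
      have hbm : m % ((size + 1) / 2).toNat < ((size + 1) / 2).toNat := Nat.mod_lt _ hnbc0
      have h := pvBlocksA_getElem hs _ _ ham hbm
      rw [Nat.mul_comm (m / ((size + 1) / 2).toNat) (((size + 1) / 2).toNat),
        Nat.div_add_mod, List.getElem?_eq_getElem hm] at h
      exact Option.some.inj h
    intro x hx y hy
    rw [PySem.List.getElem_enumerate _ _ i (by rwa [PySem.List.length_enumerate])] at hx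
    rw [PySem.List.getElem_enumerate _ _ j (by rwa [PySem.List.length_enumerate])] at hy
    simp only [hblkget i hi, hblkget j hj] at hx hy
    rcases pvCellsA_mem hx with ⟨lr, lc, hlr, hlc, hr2, hc2, rfl⟩
    rcases pvCellsA_mem hy with ⟨lr', lc', hlr', hlc', hr2', hc2', rfl⟩
    intro heq
    simp only at heq
    have hinj := pvEnc_inj (by omega) hc2 (by omega) hc2' heq
    have hdiv : i / ((size + 1) / 2).toNat = j / ((size + 1) / 2).toNat := by omega
    have hmod : i % ((size + 1) / 2).toNat = j % ((size + 1) / 2).toNat := by omega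
    have : i = j := by
      calc i = ((size + 1) / 2).toNat * (i / ((size + 1) / 2).toNat) + i % ((size + 1) / 2).toNat :=
            (Nat.div_add_mod i _).symm
        _ = ((size + 1) / 2).toNat * (j / ((size + 1) / 2).toNat) + j % ((size + 1) / 2).toNat := by
            rw [hdiv, hmod]
        _ = j := Nat.div_add_mod j _
    omega

theorem pvNatDecomp (k S : Nat) : k / S * S + k % S = k := by
  rw [Nat.mul_comm]
  exact Nat.div_add_mod k S

theorem generate_ids_main (size : Int) : generate_ids size = generate_ids_alt size := by
  rw [pvA_eq, pvB_eq]
  rcases le_or_gt size 0 with hs | hs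
  · have hA : pvEventsA size = [] := by
      unfold pvEventsA pvBlocksA
      rw [PySem.List.pyRange_of_pos 0 size (by norm_num : (0:Int) < 2), if_neg (by omega)]
      simp
    have hB : pvEventsB size = [] := by
      unfold pvEventsB
      rw [PySem.List.pyRange_one_eq_nil hs]
      rfl
    rw [hA, hB]
  · obtain ⟨S, rfl⟩ : ∃ S : Nat, size = (S : Int) :=
      ⟨size.toNat, (Int.toNat_of_nonneg hs.le).symm⟩
    have hS0 : 0 < S := by exact_mod_cast hs
    have hN : (pvInit (S : Int)).length = S * S := by
      simp only [pvInit, List.length_replicate]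
      exact_mod_cast Int.toNat_natCast (S * S)
    apply List.ext_getElem?
    intro k
    by_cases hk : k < S * S
    · -- names for the cell coordinates
      have hr : k / S < S := (Nat.div_lt_iff_lt_mul hS0).2 hk
      have hc : k % S < S := Nat.mod_lt _ hS0
      obtain ⟨r, c, hrS, hcS, hkrc⟩ : ∃ r c : Nat, r < S ∧ c < S ∧ r * S + c = k :=
        ⟨k / S, k % S, hr, hc, pvNatDecomp k S⟩
      -- ===== B side =====
      have hmemB : (((r : Nat) : Int) * (S : Int) + ((c : Nat) : Int),
          pvValB (S : Int) ((r : Nat) : Int) ((c : Nat) : Int)) ∈ pvEventsB (S : Int) := by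
        unfold pvEventsB
        refine List.mem_flatMap.2 ⟨((r : Nat) : Int), ?_, ?_⟩
        · rw [PySem.List.mem_pyRange_one]
          constructor <;> exact_mod_cast by omega
        · exact List.mem_map.2 ⟨((c : Nat) : Int),
            by rw [PySem.List.mem_pyRange_one]; constructor <;> exact_mod_cast by omega, rfl⟩
      have hposB : (((r : Nat) : Int) * (S : Int) + ((c : Nat) : Int)).toNat = k := by
        have h1 : ((r : Nat) : Int) * (S : Int) + ((c : Nat) : Int)
            = ((r * S + c : Nat) : Int) := by push_cast; ring
        rw [h1, hkrc, Int.toNat_natCast]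
      have hB := pvWr_mem (pvEventsB (S : Int)) (pvInit (S : Int)) pvEventsB_bounds
        pvEventsB_pairwise _ hmemB
      rw [hposB] at hB
      -- ===== A side =====
      have hnbc : ((((S : Int) + 1) / 2).toNat) = (S + 1) / 2 := by omega
      have hnbc0 : 0 < (S + 1) / 2 := by omega
      have ha : r / 2 < (S + 1) / 2 := by omega
      have hb : c / 2 < (S + 1) / 2 := by omega
      have hilen : r / 2 * ((S + 1) / 2) + c / 2 < (pvBlocksA (S : Int)).length := by
        rw [pvBlocksA_length (by exact_mod_cast hS0), hnbc]
        calc r / 2 * ((S + 1) / 2) + c / 2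
            < (r / 2 + 1) * ((S + 1) / 2) := by rw [Nat.succ_mul]; omega
          _ ≤ (S + 1) / 2 * ((S + 1) / 2) := Nat.mul_le_mul_right _ (by omega)
      have hblkA : (pvBlocksA (S : Int))[r / 2 * ((S + 1) / 2) + c / 2]?
          = some ((2 * ((r / 2 : Nat) : Int), 2 * ((c / 2 : Nat) : Int))) := by
        have := pvBlocksA_getElem (size := (S : Int)) (by exact_mod_cast hS0)
          (r / 2) (c / 2) (by omega) (by omega)
        rwa [hnbc] at this
      have hqmem : (((1 : Int) + ((r / 2 * ((S + 1) / 2) + c / 2 : Nat) : Int)),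
            ((2 * ((r / 2 : Nat) : Int), 2 * ((c / 2 : Nat) : Int)) : Int × Int))
          ∈ PySem.List.enumerate (pvBlocksA (S : Int)) 1 := by
        refine (PySem.List.mem_enumerate_iff _ _ _).2
          ⟨r / 2 * ((S + 1) / 2) + c / 2, hilen, ?_⟩
        rw [List.getElem?_eq_getElem hilen] at hblkA
        rw [Option.some.inj hblkA]
      -- the cell event inside that block
      have hlrmem : ((((r % 2 : Nat) : Int), ((c % 2 : Nat) : Int)))
          ∈ [((0:Int),(0:Int)), (0,1), (1,0), (1,1)] := by
        have h1 : r % 2 = 0 ∨ r % 2 = 1 := by omega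
        have h2 : c % 2 = 0 ∨ c % 2 = 1 := by omega
        rcases h1 with h1 | h1 <;> rcases h2 with h2 | h2 <;> rw [h1, h2] <;> simp
      have hrow : 2 * ((r / 2 : Nat) : Int) + ((r % 2 : Nat) : Int) = ((r : Nat) : Int) := by
        push_cast
        omega
      have hcol : 2 * ((c / 2 : Nat) : Int) + ((c % 2 : Nat) : Int) = ((c : Nat) : Int) := by
        push_cast
        omega
      have hcell : ((((r : Nat) : Int)) * (S : Int) + ((c : Nat) : Int),
            some [("global_id", (((r : Nat) : Int)) * (S : Int) + ((c : Nat) : Int) + 1),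
                  ("group_id", (1 : Int) + ((r / 2 * ((S + 1) / 2) + c / 2 : Nat) : Int)),
                  ("local_id", ((r % 2 : Nat) : Int) * 2 + ((c % 2 : Nat) : Int) + 1)])
          ∈ pvCellsA (S : Int) ((1 : Int) + ((r / 2 * ((S + 1) / 2) + c / 2 : Nat) : Int))
              (2 * ((r / 2 : Nat) : Int)) (2 * ((c / 2 : Nat) : Int)) := by
        unfold pvCellsA
        refine List.mem_map.2 ⟨(((r % 2 : Nat) : Int), ((c % 2 : Nat) : Int)), ?_, ?_⟩
        · refine List.mem_filter.2 ⟨hlrmem, ?_⟩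
          rw [decide_eq_true_eq]
          constructor
          · simp only [hrow]
            exact_mod_cast hrS
          · simp only [hcol]
            exact_mod_cast hcS
        · simp only [hrow, hcol]
      have hmemA : _ ∈ pvEventsA (S : Int) := List.mem_flatMap.2 ⟨_, hqmem, hcell⟩
      have hA := pvWr_mem (pvEventsA (S : Int)) (pvInit (S : Int)) pvEventsA_bounds
        (pvEventsA_pairwise (by exact_mod_cast hS0)) _ hmemA
      rw [hposB] at hA
      rw [hA, hB]
      -- the two payloads agree
      unfold pvValB
      rw [PySem.Int.floordiv_eq_ediv_of_pos (by norm_num), PySem.Int.floordiv_eq_ediv_of_pos (by norm_num),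
        PySem.Int.floordiv_eq_ediv_of_pos (by norm_num), PySem.Int.mod_eq_emod_of_pos (by norm_num),
        PySem.Int.mod_eq_emod_of_pos (by norm_num)]
      have e1 : ((r : Nat) : Int) / 2 = ((r / 2 : Nat) : Int) := by push_cast; omega
      have e2 : (((S : Int)) + 1) / 2 = (((S + 1) / 2 : Nat) : Int) := by push_cast; omega
      have e3 : ((c : Nat) : Int) / 2 = ((c / 2 : Nat) : Int) := by push_cast; omega
      have e4 : ((r : Nat) : Int) % 2 = ((r % 2 : Nat) : Int) := by push_cast; omega
      have e5 : ((c : Nat) : Int) % 2 = ((c % 2 : Nat) : Int) := by push_cast; omega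
      rw [e1, e2, e3, e4, e5]
      have egroup : (1 : Int) + ((r / 2 * ((S + 1) / 2) + c / 2 : Nat) : Int)
          = ((r / 2 : Nat) : Int) * (((S + 1) / 2 : Nat) : Int) + ((c / 2 : Nat) : Int) + 1 := by
        push_cast
        ring
      rw [egroup]
    · rw [List.getElem?_eq_none (by rw [pvWr_length, hN]; omega),
        List.getElem?_eq_none (by rw [pvWr_length, hN]; omega)]

-- ===== VERDICT (by name: the statement is the Claim_ definition above) =====
theorem generate_ids_spec : Claim_equal_generate_ids := by
  intro size _
  unfold Spec_generate_ids
  exact generate_ids_main size
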